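-- pv_equiv track=rewrite | github.com/yhlimath/Spider-action-codes | sl3hecke/sl3_hecke.py | bend_string
-- ===== SOURCE A (Python) =====
-- def form_triplets_with_positions(sequence):
--     sequence = sequence[:]
--     indexed_sequence = list(enumerate(sequence))
--     triplets = []
--
--     while indexed_sequence:
--         try:
--             index_1 = max(i for i, val in indexed_sequence if val == 1)
--         except ValueError:
--             break
--         try:
--             index_0 = next(i for i, val in indexed_sequence if val == 0 and i > index_1)
--         except StopIteration:
--             break
--         try:
--             index_neg1 = next(i for i, val in indexed_sequence if val == -1 and i > index_0)
--         except StopIteration: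
--             break
--
--         triplet = ((1, index_1), (0, index_0), (-1, index_neg1))
--         triplets.append(triplet)
--
--         indexed_sequence = [(i, val) for i, val in indexed_sequence if i not in {index_1, index_0, index_neg1}]
--
--     return triplets
--
-- def bend_string(sequence):
--     sequence = sequence[:]
--     indexed_sequence = list(enumerate(sequence))
--
--     try:
--         start_1_index = next(i for i, val in indexed_sequence if val == 1)
--     except StopIteration:
--         return sequence
--
--     triplets = form_triplets_with_positions(sequence)
--     for triplet in triplets:
--         if triplet[0][0] == 1 and triplet[0][1] == start_1_index:
--             index_1, index_0, index_neg1 = triplet[0][1], triplet[1][1], triplet[2][1]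
--             break
--     else:
--         return sequence
--
--     new_sequence = sequence[:]
--     new_sequence[index_0] = 1
--     new_sequence[index_neg1] = 0
--     new_sequence.pop(index_1)
--     new_sequence.append(-1)
--
--     return new_sequence
-- ===== SOURCE B (Python) =====
-- def _take_first_gt(xs, x):
--     # xs: ascending positions; return (first element > x, xs without it) or None
--     for j, v in enumerate(xs):
--         if v > x:
--             return v, xs[:j] + xs[j+1:]
--     return None
--
-- def bend_string(sequence):
--     ones = [i for i, v in enumerate(sequence) if v == 1]
--     if not ones:
--         return sequence[:]
--     zeros = [i for i, v in enumerate(sequence) if v == 0]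
--     negs = [i for i, v in enumerate(sequence) if v == -1]
--     last = None
--     for i1 in reversed(ones):
--         r = _take_first_gt(zeros, i1)
--         if r is None:
--             return sequence[:]
--         i0, zeros = r
--         r = _take_first_gt(negs, i0)
--         if r is None:
--             return sequence[:]
--         ineg, negs = r
--         last = (i1, i0, ineg)
--     i1, i0, ineg = last
--     new = sequence[:]
--     new[i0] = 1
--     new[ineg] = 0
--     del new[i1]
--     new.append(-1)
--     return new
-- ===== Notes on version B (the rewrite author's own statement) =====
-- stated objective: alternative
-- what changed: B extracts the sorted position lists of 1s, 0s and -1s once and runs the greedy matching as a single pass over the 1-positions (largest first), consuming each 0/-1 position list in place, instead of A's per-round rebuild-and-rescan of the whole enumerated sequence (a max scan, two linear searches and a full filter per matched triplet).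
import Mathlib
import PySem

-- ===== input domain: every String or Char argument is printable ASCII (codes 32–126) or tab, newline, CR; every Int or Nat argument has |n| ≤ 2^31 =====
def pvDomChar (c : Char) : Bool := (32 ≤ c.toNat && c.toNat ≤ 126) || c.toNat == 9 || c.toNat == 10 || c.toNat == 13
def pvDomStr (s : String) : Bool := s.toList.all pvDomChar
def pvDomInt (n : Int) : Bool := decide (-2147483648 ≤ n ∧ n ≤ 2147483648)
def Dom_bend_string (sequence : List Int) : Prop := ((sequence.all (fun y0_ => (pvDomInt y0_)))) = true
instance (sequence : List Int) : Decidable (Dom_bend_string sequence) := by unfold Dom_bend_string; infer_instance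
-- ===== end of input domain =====

-- B replaces A's rescan-and-rebuild greedy (rebuilding and rescanning the whole indexed list
-- every round) with one pass over the 1-positions consuming sorted 0-/-1-position lists
-- (objective: alternative algorithm with simpler state; measured speed comparable).

-- ===== PORT A =====
-- max(i for i, val in L if val == 1)
def ftMax1 (L : List (Int × Int)) : Option Int :=
  PySem.List.max? ((L.filter (fun p => p.2 == 1)).map (·.1)) (fun x => x)

-- the while-loop of form_triplets_with_positions (fuel = initial length; each pass removes ≥ 1 element)
def ftLoop : Nat → List (Int × Int) → List ((Int × Int) × (Int × Int) × (Int × Int)) →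
    List ((Int × Int) × (Int × Int) × (Int × Int))
  | 0, _, acc => acc
  | Nat.succ fuel, L, acc =>
    if L.isEmpty then acc else
    match ftMax1 L with
    | none => acc
    | some i1 =>
      match (L.find? (fun p => p.2 == 0 && decide (i1 < p.1))).map (·.1) with
      | none => acc
      | some i0 =>
        match (L.find? (fun p => p.2 == -1 && decide (i0 < p.1))).map (·.1) with
        | none => acc
        | some ineg =>
          ftLoop fuel (L.filter (fun p => !(p.1 == i1 || p.1 == i0 || p.1 == ineg)))
            (acc ++ [((1, i1), (0, i0), (-1, ineg))])

def form_triplets_with_positions (sequence : List Int) :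
    List ((Int × Int) × (Int × Int) × (Int × Int)) :=
  ftLoop sequence.length (PySem.List.enumerate sequence 0) []

def bend_string (sequence : List Int) : List Int :=
  match ((PySem.List.enumerate sequence 0).find? (fun p => p.2 == 1)).map (·.1) with
  | none => sequence
  | some start1 =>
    match (form_triplets_with_positions sequence).find?
        (fun t => t.1.1 == 1 && t.1.2 == start1) with
    | none => sequence
    | some t =>
      match PySem.List.pop?
          (PySem.List.pySetD (PySem.List.pySetD sequence t.2.1.2 1) t.2.2.2 0) t.1.2 with
      | some r => r.2 ++ [-1]
      | none => PySem.List.pySetD (PySem.List.pySetD sequence t.2.1.2 1) t.2.2.2 0  -- unreachable: t.1.2 is a valid index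

-- ===== PORT B =====
-- _take_first_gt(xs, x): first element > x together with the list without it
def takeFirstGt : List Int → Int → Option (Int × List Int)
  | [], _ => none
  | v :: rest, x =>
    if x < v then some (v, rest)
    else (takeFirstGt rest x).map (fun r => (r.1, v :: r.2))

-- the for-loop over reversed(ones); returns the triple of the LAST iteration, none on any failure
def altLoop : List Int → List Int → List Int → Option (Int × Int × Int)
  | [], _, _ => none
  | i1 :: rest, zeros, negs =>
    match takeFirstGt zeros i1 with
    | none => none
    | some (i0, zs) =>
      match takeFirstGt negs i0 with
      | none => none
      | some (ineg, ns) =>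
        match rest with
        | [] => some (i1, i0, ineg)
        | _ => altLoop rest zs ns

def bend_string_alt (sequence : List Int) : List Int :=
  let ones := ((PySem.List.enumerate sequence 0).filter (fun p => p.2 == 1)).map (·.1)
  if ones.isEmpty then sequence
  else
    let zeros := ((PySem.List.enumerate sequence 0).filter (fun p => p.2 == 0)).map (·.1)
    let negs := ((PySem.List.enumerate sequence 0).filter (fun p => p.2 == -1)).map (·.1)
    match altLoop ones.reverse zeros negs with
    | none => sequence
    | some (i1, i0, ineg) =>
      match PySem.List.pop? (PySem.List.pySetD (PySem.List.pySetD sequence i0 1) ineg 0) i1 with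
      | some r => r.2 ++ [-1]
      | none => PySem.List.pySetD (PySem.List.pySetD sequence i0 1) ineg 0  -- unreachable: i1 is a valid index

-- ===== PRECONDITION & SPEC =====
def Spec_bend_string (sequence : List Int) (out : List Int) : Prop := out = bend_string_alt sequence
instance (sequence : List Int) (out : List Int) : Decidable (Spec_bend_string sequence out) := by unfold Spec_bend_string; infer_instance

-- ===== CLAIM (what is proved, stated in full; the proofs are below) =====
def Claim_equal_bend_string : Prop := ∀ (sequence : List Int), Dom_bend_string sequence → Spec_bend_string sequence (bend_string sequence)

-- ===== LEMMAS AND PROOFS =====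

-- positions in L carrying value v, in order
def valsOf (v : Int) (L : List (Int × Int)) : List Int :=
  (L.filter (fun p => p.2 == v)).map (·.1)

-- strictly ascending first components
def Asc (L : List (Int × Int)) : Prop := L.Pairwise (fun p q => p.1 < q.1)

-- the common greedy: for each 1-position (largest first) take the first unused
-- 0-position after it, then the first unused (-1)-position after that; stop on failure
def gSpec : List Int → List Int → List Int → List (Int × Int × Int)
  | [], _, _ => []
  | i1 :: rest, zeros, negs =>
    match takeFirstGt zeros i1 with
    | none => []
    | some (i0, zs) =>
      match takeFirstGt negs i0 with
      | none => []
      | some (ineg, ns) => (i1, i0, ineg) :: gSpec rest zs ns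

theorem getLast?_cons_ne {α : Type} (a : α) {l : List α} (h : l ≠ []) :
    (a :: l).getLast? = l.getLast? := by
  cases l with
  | nil => exact absurd rfl h
  | cons b t => rw [List.getLast?_cons_cons]

theorem mem_valsOf {v i : Int} {L : List (Int × Int)} : i ∈ valsOf v L ↔ (i, v) ∈ L := by
  simp only [valsOf, List.mem_map, List.mem_filter, beq_iff_eq]
  constructor
  · rintro ⟨⟨a, b⟩, ⟨hin, hb⟩, rfl⟩
    simp only at hb
    subst hb; exact hin
  · intro h; exact ⟨(i, v), ⟨h, rfl⟩, rfl⟩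

theorem valsOf_filter_fst (v : Int) (P : Int → Bool) (L : List (Int × Int)) :
    valsOf v (L.filter (fun p => P p.1)) = (valsOf v L).filter P := by
  induction L with
  | nil => rfl
  | cons p t ih =>
    by_cases h1 : p.2 = v <;> by_cases h2 : P p.1 = true <;>
      simp [valsOf, h1, h2] at ih ⊢ <;> exact ih

theorem asc_filter {L : List (Int × Int)} (q : Int × Int → Bool) (h : Asc L) : Asc (L.filter q) :=
  List.Pairwise.sublist List.filter_sublist h

theorem pairwise_valsOf {v : Int} {L : List (Int × Int)} (h : Asc L) :
    (valsOf v L).Pairwise (· < ·) := by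
  unfold valsOf
  rw [List.pairwise_map]
  exact asc_filter _ h

theorem fst_unique {L : List (Int × Int)} (h : Asc L) {i v w : Int}
    (hv : (i, v) ∈ L) (hw : (i, w) ∈ L) : v = w := by
  induction L with
  | nil => cases hv
  | cons p t ih =>
    rcases List.pairwise_cons.mp h with ⟨hp, ht⟩
    rcases List.mem_cons.mp hv with hv' | hv' <;> rcases List.mem_cons.mp hw with hw' | hw'
    · rw [← hv'] at hw'; exact (Prod.mk.injEq _ _ _ _ ▸ hw').2.symm ▸ rfl
    · exact absurd (hp _ hw') (by rw [← hv']; simp)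
    · exact absurd (hp _ hv') (by rw [← hw']; simp)
    · exact ih ht hv' hw'

theorem foldl_max_asc : ∀ (t : List Int) (x : Int), (x :: t).Pairwise (· < ·) →
    some (t.foldl max x) = (x :: t).getLast?
  | [], _, _ => rfl
  | y :: t', x, h => by
    have hxy : x < y := (List.pairwise_cons.mp h).1 y (by simp)
    have h' : (y :: t').Pairwise (· < ·) := (List.pairwise_cons.mp h).2
    rw [List.foldl_cons, max_eq_right hxy.le, List.getLast?_cons_cons]
    exact foldl_max_asc t' y h'

theorem ftMax1_eq_getLast? {L : List (Int × Int)} (h : Asc L) :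
    ftMax1 L = (valsOf 1 L).getLast? := by
  have hp : (valsOf 1 L).Pairwise (· < ·) := pairwise_valsOf h
  show PySem.List.max? (valsOf 1 L) (fun y => y) = _
  cases hv : valsOf 1 L with
  | nil => simp [PySem.List.max?_eq_none_iff]
  | cons x t =>
    rw [PySem.List.max?_id_cons]
    exact foldl_max_asc t x (hv ▸ hp)

theorem find?_eq_takeFirstGt (v x : Int) (L : List (Int × Int)) :
    ((L.find? (fun p => p.2 == v && decide (x < p.1))).map (·.1)) =
    (takeFirstGt (valsOf v L) x).map (·.1) := by
  induction L with
  | nil => rfl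
  | cons p t ih =>
    by_cases hv : p.2 = v
    · have hz : valsOf v (p :: t) = p.1 :: valsOf v t := by simp [valsOf, hv]
      rw [hz]
      by_cases hx : x < p.1
      · simp [List.find?_cons, takeFirstGt, hv, hx]
      · simp only [List.find?_cons, takeFirstGt, hv, hx]
        simp only [decide_eq_true_eq, hx, Bool.and_false, if_false, beq_self_eq_true,
          Bool.true_and, decide_false]
        rw [ih, Option.map_map]
        rfl
    · have hz : valsOf v (p :: t) = valsOf v t := by simp [valsOf, hv]
      rw [hz, List.find?_cons]
      have : (p.2 == v && decide (x < p.1)) = false := by simp [hv]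
      rw [this]
      exact ih

theorem takeFirstGt_mem : ∀ {zs : List Int} {x i0 : Int} {rest : List Int},
    takeFirstGt zs x = some (i0, rest) → i0 ∈ zs := by
  intro zs
  induction zs with
  | nil => intro x i0 rest h; cases h
  | cons v t ih =>
    intro x i0 rest h
    by_cases hx : x < v
    · simp [takeFirstGt, hx] at h
      simp [h.1]
    · simp only [takeFirstGt, hx, if_false, Option.map_eq_some_iff] at h
      obtain ⟨r, hr, he⟩ := h
      have : i0 = r.1 := by cases he; rfl
      subst this
      exact List.mem_cons_of_mem _ (ih hr)

theorem takeFirstGt_rest : ∀ {zs : List Int} {x i0 : Int} {rest : List Int},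
    zs.Nodup → takeFirstGt zs x = some (i0, rest) →
    rest = zs.filter (fun j => !(j == i0)) := by
  intro zs
  induction zs with
  | nil => intro x i0 rest _ h; cases h
  | cons v t ih =>
    intro x i0 rest hnd h
    have hvt : v ∉ t := (List.nodup_cons.mp hnd).1
    have hndt : t.Nodup := (List.nodup_cons.mp hnd).2
    by_cases hx : x < v
    · simp [takeFirstGt, hx] at h
      obtain ⟨rfl, rfl⟩ := h
      rw [List.filter_cons]
      simp only [beq_self_eq_true, Bool.not_true, if_false]
      symm
      apply List.filter_eq_self.mpr
      intro a ha
      have : a ≠ v := fun e => hvt (e ▸ ha)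
      simp [this]
    · simp only [takeFirstGt, hx, if_false, Option.map_eq_some_iff] at h
      obtain ⟨r, hr, he⟩ := h
      have h1 : i0 = r.1 := by cases he; rfl
      have h2 : rest = v :: r.2 := by cases he; rfl
      subst h1; subst h2
      have hvne : v ≠ r.1 := fun e => hvt (e ▸ takeFirstGt_mem hr)
      rw [List.filter_cons]
      rw [if_pos (by simp [hvne])]
      obtain ⟨ri, rr⟩ := r
      rw [ih hndt hr]

theorem dropLast_cons_cons {α : Type} (x y : α) (t : List α) :
    (x :: y :: t).dropLast = x :: (y :: t).dropLast := rfl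

theorem filter_ne_getLast : ∀ {xs : List Int} {m : Int}, xs.Pairwise (· < ·) →
    xs.getLast? = some m → xs.filter (fun j => !(j == m)) = xs.dropLast := by
  intro xs
  induction xs with
  | nil => intro m _ h; cases h
  | cons x t ih =>
    intro m hpw hl
    cases t with
    | nil =>
      have : x = m := by simpa using hl
      subst this
      simp
    | cons y t' =>
      rw [List.getLast?_cons_cons] at hl
      have hmem : m ∈ y :: t' := List.mem_of_getLast? hl
      have hxm : x < m := (List.pairwise_cons.mp hpw).1 m hmem
      rw [List.filter_cons, if_pos (by simp [ne_of_lt hxm]), dropLast_cons_cons]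
      rw [ih (List.pairwise_cons.mp hpw).2 hl]

-- main A-side lemma: the while-loop computes gSpec on the reversed 1-positions
theorem ftLoop_eq_gSpec (fuel : ℕ) (L : List (Int × Int))
    (acc : List ((Int × Int) × (Int × Int) × (Int × Int)))
    (hA : Asc L) (hf : L.length ≤ fuel) :
    ftLoop fuel L acc =
      acc ++ (gSpec (valsOf 1 L).reverse (valsOf 0 L) (valsOf (-1) L)).map
        (fun t => ((1, t.1), (0, t.2.1), (-1, t.2.2))) := by
  induction fuel generalizing L acc with
  | zero =>
    have hL : L = [] := List.eq_nil_of_length_eq_zero (Nat.le_zero.mp hf)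
    subst hL
    simp [ftLoop, valsOf, gSpec]
  | succ f ih =>
    by_cases hL : L = []
    · subst hL; simp [ftLoop, valsOf, gSpec]
    · have hLe : L.isEmpty = false := by simp [List.isEmpty_iff, hL]
      cases hmax : ftMax1 L with
      | none =>
        have h0 : valsOf 1 L = [] := by
          have : (valsOf 1 L).getLast? = none := by rw [← ftMax1_eq_getLast? hA, hmax]
          simpa using this
        rw [ftLoop, if_neg (by simp [hLe]), hmax, h0]
        simp [gSpec]
      | some i1 =>
        have hlast : (valsOf 1 L).getLast? = some i1 := by rw [← ftMax1_eq_getLast? hA, hmax]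
        have hne : valsOf 1 L ≠ [] := by intro h; rw [h] at hlast; cases hlast
        have hgl : (valsOf 1 L).getLast hne = i1 := by
          have h2 := List.getLast?_eq_some_getLast (l := valsOf 1 L) hne
          rw [h2] at hlast; exact Option.some.inj hlast
        have hsplit : valsOf 1 L = (valsOf 1 L).dropLast ++ [i1] := by
          conv_lhs => rw [← List.dropLast_append_getLast hne]
          rw [hgl]
        have hrev : (valsOf 1 L).reverse = i1 :: (valsOf 1 L).dropLast.reverse := by
          conv_lhs => rw [hsplit]
          simp
        rcases hz : takeFirstGt (valsOf 0 L) i1 with _ | ⟨i0, zs⟩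
        · rw [ftLoop, if_neg (by simp [hLe]), hmax]
          simp only []
          rw [find?_eq_takeFirstGt 0 i1 L, hz, hrev]
          simp [gSpec, hz]
        · rcases hn : takeFirstGt (valsOf (-1) L) i0 with _ | ⟨ineg, ns⟩
          · rw [ftLoop, if_neg (by simp [hLe]), hmax]
            simp only []
            rw [find?_eq_takeFirstGt 0 i1 L, hz]
            simp only [Option.map_some]
            rw [find?_eq_takeFirstGt (-1) i0 L, hn, hrev]
            simp [gSpec, hz, hn]
          · have hi1 : (i1, 1) ∈ L := mem_valsOf.mp (by rw [hsplit]; simp)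
            have hi0 : (i0, 0) ∈ L := mem_valsOf.mp (takeFirstGt_mem hz)
            have hineg : (ineg, -1) ∈ L := mem_valsOf.mp (takeFirstGt_mem hn)
            have hAsc' : Asc (L.filter (fun p => !(p.1 == i1 || p.1 == i0 || p.1 == ineg))) :=
              asc_filter _ hA
            have hvals : ∀ v : Int,
                valsOf v (L.filter (fun p => !(p.1 == i1 || p.1 == i0 || p.1 == ineg))) =
                (valsOf v L).filter (fun j => !(j == i1 || j == i0 || j == ineg)) :=
              fun v => valsOf_filter_fst v (fun j => !(j == i1 || j == i0 || j == ineg)) L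
            have hnd0 : (valsOf 0 L).Nodup :=
              (pairwise_valsOf hA).imp (fun hlt => ne_of_lt hlt)
            have hndn : (valsOf (-1) L).Nodup :=
              (pairwise_valsOf hA).imp (fun hlt => ne_of_lt hlt)
            have hz' : valsOf 0 (L.filter (fun p => !(p.1 == i1 || p.1 == i0 || p.1 == ineg))) = zs := by
              rw [hvals 0, takeFirstGt_rest hnd0 hz]
              apply List.filter_congr
              intro j hj
              have hjm : (j, 0) ∈ L := mem_valsOf.mp hj
              have hne1 : j ≠ i1 := fun e => by
                subst e; exact absurd (fst_unique hA hjm hi1) (by norm_num)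
              have hne2 : j ≠ ineg := fun e => by
                subst e; exact absurd (fst_unique hA hjm hineg) (by norm_num)
              have e1 : (j == i1) = false := by simp [hne1]
              have e2 : (j == ineg) = false := by simp [hne2]
              simp [e1, e2]
            have hn' : valsOf (-1) (L.filter (fun p => !(p.1 == i1 || p.1 == i0 || p.1 == ineg))) = ns := by
              rw [hvals (-1), takeFirstGt_rest hndn hn]
              apply List.filter_congr
              intro j hj
              have hjm : (j, -1) ∈ L := mem_valsOf.mp hj
              have hne1 : j ≠ i1 := fun e => by
                subst e; exact absurd (fst_unique hA hjm hi1) (by norm_num)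
              have hne2 : j ≠ i0 := fun e => by
                subst e; exact absurd (fst_unique hA hjm hi0) (by norm_num)
              have e1 : (j == i1) = false := by simp [hne1]
              have e2 : (j == i0) = false := by simp [hne2]
              simp [e1, e2]
            have ho' : valsOf 1 (L.filter (fun p => !(p.1 == i1 || p.1 == i0 || p.1 == ineg))) =
                (valsOf 1 L).dropLast := by
              rw [hvals 1, ← filter_ne_getLast (pairwise_valsOf hA) hlast]
              apply List.filter_congr
              intro j hj
              have hjm : (j, 1) ∈ L := mem_valsOf.mp hj
              have hne0 : j ≠ i0 := fun e => by
                subst e; exact absurd (fst_unique hA hjm hi0) (by norm_num)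
              have hnen : j ≠ ineg := fun e => by
                subst e; exact absurd (fst_unique hA hjm hineg) (by norm_num)
              have e1 : (j == i0) = false := by simp [hne0]
              have e2 : (j == ineg) = false := by simp [hnen]
              simp [e1, e2]
            have hlen : (L.filter (fun p => !(p.1 == i1 || p.1 == i0 || p.1 == ineg))).length ≤ f := by
              have hlt : (L.filter (fun p => !(p.1 == i1 || p.1 == i0 || p.1 == ineg))).length < L.length := by
                apply List.length_filter_lt_length_iff_exists.mpr
                exact ⟨(i1, 1), hi1, by simp⟩
              omega
            rw [ftLoop, if_neg (by simp [hLe]), hmax]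
            simp only []
            rw [find?_eq_takeFirstGt 0 i1 L, hz]
            simp only [Option.map_some]
            rw [find?_eq_takeFirstGt (-1) i0 L, hn]
            simp only [Option.map_some]
            rw [ih _ _ hAsc' hlen, ho', hz', hn', hrev]
            simp [gSpec, hz, hn]

theorem altLoop_eq_gSpec : ∀ (o z n : List Int),
    altLoop o z n =
      if (gSpec o z n).length = o.length then (gSpec o z n).getLast? else none := by
  intro o
  induction o with
  | nil => intro z n; simp [altLoop, gSpec]
  | cons i1 rest ih =>
    intro z n
    rcases hz : takeFirstGt z i1 with _ | ⟨i0, zs⟩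
    · rw [altLoop, gSpec, hz]
      simp
    · rcases hn : takeFirstGt n i0 with _ | ⟨ineg, ns⟩
      · rw [altLoop, gSpec, hz]
        simp only []
        rw [hn]
        simp
      · cases rest with
        | nil =>
          rw [altLoop, gSpec, hz]
          simp only []
          rw [hn]
          simp [gSpec]
        | cons r rs =>
          rw [altLoop, gSpec, hz]
          simp only []
          rw [hn]
          simp only []
          rw [ih zs ns]
          by_cases hk : (gSpec (r :: rs) zs ns).length = (r :: rs).length
          · rw [if_pos hk, if_pos (by simp [hk])]
            have hnegl : gSpec (r :: rs) zs ns ≠ [] := by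
              intro h; rw [h] at hk; simp at hk
            rw [getLast?_cons_ne _ hnegl]
          · simp only [List.length_cons] at hk
            rw [if_neg (by simp only [List.length_cons] at *; omega),
              if_neg (by simp only [List.length_cons]; omega)]

theorem gSpec_map_fst : ∀ (o z n : List Int),
    (gSpec o z n).map (·.1) = o.take (gSpec o z n).length ∧ (gSpec o z n).length ≤ o.length := by
  intro o
  induction o with
  | nil => intro z n; simp [gSpec]
  | cons i1 rest ih =>
    intro z n
    rcases hz : takeFirstGt z i1 with _ | ⟨i0, zs⟩
    · rw [gSpec, hz]
      simp
    · rcases hn : takeFirstGt n i0 with _ | ⟨ineg, ns⟩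
      · rw [gSpec, hz]
        simp only []
        rw [hn]
        simp
      · rw [gSpec, hz]
        simp only []
        rw [hn]
        simp only []
        obtain ⟨h1, h2⟩ := ih zs ns
        constructor
        · simp only [List.map_cons, List.length_cons, List.take_succ_cons]
          rw [h1]
        · simp only [List.length_cons]
          omega

theorem find?_head1 (L : List (Int × Int)) :
    ((L.find? (fun p => p.2 == 1)).map (·.1)) = (valsOf 1 L).head? := by
  induction L with
  | nil => rfl
  | cons p t ih =>
    by_cases hv : p.2 = 1
    · simp [List.find?_cons, valsOf, hv]
    · have hz : valsOf 1 (p :: t) = valsOf 1 t := by simp [valsOf, hv]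
      rw [hz, List.find?_cons]
      have : (p.2 == (1 : Int)) = false := by simp [hv]
      rw [this]
      exact ih

theorem find?_last_of_map_fst : ∀ {l : List (Int × Int × Int)} {s : List Int} {h : Int},
    l.map (·.1) = s ++ [h] → h ∉ s →
    l.find? (fun t => t.1 == h) = l.getLast? := by
  intro l
  induction l with
  | nil => intro s h hmap _; exact absurd hmap (by simp)
  | cons t rest ih =>
    intro s h hmap hnm
    cases s with
    | nil =>
      simp only [List.map_cons, List.nil_append] at hmap
      have h1 : t.1 = h := (List.cons.injEq _ _ _ _ ▸ hmap).1
      have h2 : rest = [] := by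
        have := (List.cons.injEq _ _ _ _ ▸ hmap).2
        simpa using this
      subst h2
      simp [List.find?_cons, h1]
    | cons a s' =>
      simp only [List.map_cons, List.cons_append] at hmap
      have h1 : t.1 = a := (List.cons.injEq _ _ _ _ ▸ hmap).1
      have h2 : rest.map (·.1) = s' ++ [h] := (List.cons.injEq _ _ _ _ ▸ hmap).2
      have hha : h ≠ a := fun e => hnm (by simp [e])
      have hrest : rest ≠ [] := by
        intro e; rw [e] at h2; exact absurd h2.symm (by simp)
      rw [List.find?_cons]
      have : (t.1 == h) = false := by simp [h1]; exact fun e => hha e.symm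
      rw [this, getLast?_cons_ne _ hrest]
      exact ih h2 (fun hm => hnm (List.mem_cons_of_mem _ hm))

-- ===== VERDICT (by name: the statement is the Claim_ definition above) =====
theorem bend_string_spec : Claim_equal_bend_string := by
  intro seq _
  show bend_string seq = bend_string_alt seq
  have hAsc : Asc (PySem.List.enumerate seq 0) := PySem.List.pairwise_lt_enumerate seq 0
  unfold bend_string bend_string_alt form_triplets_with_positions
  rw [find?_head1 (PySem.List.enumerate seq 0)]
  rw [ftLoop_eq_gSpec _ _ _ hAsc (by simp [PySem.List.length_enumerate])]
  rw [List.nil_append]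
  have hones : ((PySem.List.enumerate seq 0).filter (fun p => p.2 == 1)).map (·.1) =
      valsOf 1 (PySem.List.enumerate seq 0) := rfl
  have hzeros : ((PySem.List.enumerate seq 0).filter (fun p => p.2 == 0)).map (·.1) =
      valsOf 0 (PySem.List.enumerate seq 0) := rfl
  have hnegs : ((PySem.List.enumerate seq 0).filter (fun p => p.2 == (-1))).map (·.1) =
      valsOf (-1) (PySem.List.enumerate seq 0) := rfl
  rw [hones, hzeros, hnegs]
  cases hO : valsOf 1 (PySem.List.enumerate seq 0) with
  | nil => simp [gSpec]
  | cons h tl =>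
    simp only [List.head?_cons, List.isEmpty_cons, Bool.false_eq_true, if_false]
    rw [List.find?_map]
    have hpred : ((fun t : (Int × Int) × (Int × Int) × (Int × Int) => t.1.1 == 1 && t.1.2 == h) ∘
        (fun t : Int × Int × Int => ((1, t.1), (0, t.2.1), (-1, t.2.2)))) =
        (fun t : Int × Int × Int => t.1 == h) := by
      funext t; simp
    rw [hpred]
    have hpw : (h :: tl).Pairwise (· < ·) := hO ▸ pairwise_valsOf hAsc
    have hnm : h ∉ tl.reverse := by
      simp only [List.mem_reverse]
      intro hmem
      exact absurd (List.rel_of_pairwise_cons hpw hmem) (lt_irrefl h)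
    have hrevc : (h :: tl).reverse = tl.reverse ++ [h] := by simp
    obtain ⟨hmapfst, hksmall⟩ :=
      gSpec_map_fst (h :: tl).reverse (valsOf 0 (PySem.List.enumerate seq 0))
        (valsOf (-1) (PySem.List.enumerate seq 0))
    rw [altLoop_eq_gSpec]
    by_cases hk : (gSpec (h :: tl).reverse (valsOf 0 (PySem.List.enumerate seq 0))
        (valsOf (-1) (PySem.List.enumerate seq 0))).length = (h :: tl).reverse.length
    · rw [if_pos hk]
      rw [hk, List.take_length] at hmapfst
      conv at hmapfst => rhs; rw [hrevc]
      rw [find?_last_of_map_fst hmapfst hnm]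
      rcases hg : (gSpec (h :: tl).reverse (valsOf 0 (PySem.List.enumerate seq 0))
          (valsOf (-1) (PySem.List.enumerate seq 0))).getLast? with _ | ⟨a, b, c⟩
      · exfalso
        have hnil : gSpec (h :: tl).reverse (valsOf 0 (PySem.List.enumerate seq 0))
            (valsOf (-1) (PySem.List.enumerate seq 0)) = [] := by simpa using hg
        rw [hnil] at hk
        simp at hk
      · try rw [hg]
        simp
    · rw [if_neg hk]
      have hkle : (gSpec (h :: tl).reverse (valsOf 0 (PySem.List.enumerate seq 0))
          (valsOf (-1) (PySem.List.enumerate seq 0))).length ≤ tl.reverse.length := by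
        rw [List.length_reverse] at hksmall ⊢
        simp only [List.length_cons] at hksmall
        rcases Nat.lt_or_ge ((gSpec (h :: tl).reverse (valsOf 0 (PySem.List.enumerate seq 0))
          (valsOf (-1) (PySem.List.enumerate seq 0))).length) (tl.length + 1) with hlt | hge
        · omega
        · exfalso; apply hk; rw [List.length_reverse]; simp only [List.length_cons]; omega
      have hfn : (gSpec (h :: tl).reverse (valsOf 0 (PySem.List.enumerate seq 0))
          (valsOf (-1) (PySem.List.enumerate seq 0))).find? (fun t => t.1 == h) = none := by
        apply List.find?_eq_none.mpr
        intro t ht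
        have hmem : t.1 ∈ (gSpec (h :: tl).reverse (valsOf 0 (PySem.List.enumerate seq 0))
            (valsOf (-1) (PySem.List.enumerate seq 0))).map (·.1) := List.mem_map_of_mem ht
        rw [hmapfst] at hmem
        rw [hrevc] at hkle hmem
        rw [List.take_append_of_le_length hkle] at hmem
        have hmem2 : t.1 ∈ tl.reverse := List.mem_of_mem_take hmem
        simp only [beq_iff_eq]
        intro he
        exact hnm (he ▸ hmem2)
      rw [hfn]
      simp
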